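-- pv_equiv track=rewrite | github.com/FelipePKest/tnteam | src/nk_evaluation.py | _split_prediction_episodes
-- ===== SOURCE A (Python) =====
-- def _split_prediction_episodes(predictions: list):
--     if not predictions:
--         return []
--     episodes = []
--     current_episode = []
--     prev_key = None
--     prev_timestep = None
--     for entry in predictions:
--         timestep = entry.get("timestep")
--         env_idx = entry.get("env_idx", 0)
--         current_key = (env_idx,)
--         if current_episode and (
--             timestep is None
--             or prev_timestep is None
--             or timestep < prev_timestep
--             or (timestep == 0 and current_key == prev_key)
--         ):
--             episodes.append(current_episode)
--             current_episode = []
--         current_episode.append(entry)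
--         prev_timestep = timestep
--         prev_key = current_key
--     if current_episode:
--         episodes.append(current_episode)
--     return episodes
-- ===== SOURCE B (Python) =====
-- def _split_prediction_episodes(predictions: list):
--     # index-based partition: locate each episode's end index j, then slice predictions[i:j]
--     def _is_cut(prev, cur):
--         prev_ts = prev.get("timestep")
--         ts = cur.get("timestep")
--         return (ts is None or prev_ts is None or ts < prev_ts
--                 or (ts == 0 and cur.get("env_idx", 0) == prev.get("env_idx", 0)))
--
--     episodes = []
--     n = len(predictions)
--     i = 0
--     while i < n:
--         j = i + 1
--         while j < n and not _is_cut(predictions[j - 1], predictions[j]):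
--             j += 1
--         episodes.append(predictions[i:j])
--         i = j
--     return episodes
-- ===== Notes on version B (the rewrite author's own statement) =====
-- stated objective: alternative
-- what changed: Replaces A's element-by-element state machine (episodes/current_episode/prev_key/prev_timestep accumulators updated per entry) with an index-based run finder: an outer loop over start indices whose inner scan locates the end index j of the current episode, which is then extracted in one slice predictions[i:j].
import Mathlib
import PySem

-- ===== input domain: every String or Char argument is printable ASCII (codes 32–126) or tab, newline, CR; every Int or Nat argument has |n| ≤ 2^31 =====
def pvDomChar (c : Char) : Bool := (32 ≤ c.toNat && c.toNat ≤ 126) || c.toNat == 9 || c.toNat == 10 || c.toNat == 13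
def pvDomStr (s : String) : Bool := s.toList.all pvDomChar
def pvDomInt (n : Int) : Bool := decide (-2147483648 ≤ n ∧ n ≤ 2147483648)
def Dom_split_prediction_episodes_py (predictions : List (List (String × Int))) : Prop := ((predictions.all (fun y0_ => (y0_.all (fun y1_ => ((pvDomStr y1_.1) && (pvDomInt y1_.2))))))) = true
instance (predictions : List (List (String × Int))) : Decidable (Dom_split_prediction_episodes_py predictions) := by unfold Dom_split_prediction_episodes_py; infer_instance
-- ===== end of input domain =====

-- B replaces A's per-entry state machine by an index-based run finder (find each episode's
-- end index, then slice); same cost, different decomposition. Return values proved equal on all inputs.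

-- ===== PORT A =====
-- entry.get("timestep") / entry.get("env_idx", 0)
def pvTsA (e : List (String × Int)) : Option Int := (PySem.Dict.ofList e).get? "timestep"
def pvEnvA (e : List (String × Int)) : Int := (PySem.Dict.ofList e).getD "env_idx" 0

-- A's for-loop: state = (episodes, current_episode, prev_timestep, prev_key); prev_key is
-- None or the 1-tuple (env_idx,), modelled as Option Int.
def pvLoopA : List (List (String × Int)) → List (List (List (String × Int))) →
    List (List (String × Int)) → Option Int → Option Int → List (List (List (String × Int)))
  | [], eps, cur, _, _ => if cur.isEmpty then eps else eps ++ [cur]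
  | e :: rest, eps, cur, prevTs, prevKey =>
      let ts := pvTsA e
      let env := pvEnvA e
      if !cur.isEmpty && (ts.isNone || prevTs.isNone ||
            (match ts, prevTs with | some a, some b => decide (a < b) | _, _ => false) ||
            (ts == some 0 && some env == prevKey)) then
        pvLoopA rest (eps ++ [cur]) [e] ts (some env)
      else
        pvLoopA rest eps (cur ++ [e]) ts (some env)

def split_prediction_episodes_py (predictions : List (List (String × Int))) :
    List (List (List (String × Int))) :=
  if predictions.isEmpty then [] else pvLoopA predictions [] [] none none

-- ===== PORT B =====
-- Source B's _is_cut(prev, cur)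
def pvIsCut (prev cur : List (String × Int)) : Bool :=
  let prevTs := (PySem.Dict.ofList prev).get? "timestep"
  let ts := (PySem.Dict.ofList cur).get? "timestep"
  ts.isNone || prevTs.isNone ||
    (match ts, prevTs with | some a, some b => decide (a < b) | _, _ => false) ||
    (ts == some 0 &&
      (PySem.Dict.ofList cur).getD "env_idx" 0 == (PySem.Dict.ofList prev).getD "env_idx" 0)

-- inner while: advance j while j < n and not _is_cut(predictions[j-1], predictions[j]);
-- indices are always in range (1 ≤ j < n), so List.getD is exact for Python's predictions[j]
def pvFindJ (preds : List (List (String × Int))) (n j : Nat) : Nat :=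
  if _h : j < n then
    if pvIsCut (preds.getD (j - 1) []) (preds.getD j []) then j
    else pvFindJ preds n (j + 1)
  else j
termination_by n - j

theorem pvFindJ_ge (preds : List (List (String × Int))) (n j : Nat) : j ≤ pvFindJ preds n j := by
  fun_induction pvFindJ preds n j
  all_goals omega

-- outer while: slice out predictions[i:j] and continue from i = j
def pvOuter (preds : List (List (String × Int))) (n i : Nat) : List (List (List (String × Int))) :=
  if _h : i < n then
    let j := pvFindJ preds n (i + 1)
    PySem.List.slice preds (some (i : Int)) (some (j : Int)) :: pvOuter preds n j
  else []
termination_by n - i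
decreasing_by
  have := pvFindJ_ge preds n (i + 1)
  omega

def split_prediction_episodes_py_alt (predictions : List (List (String × Int))) :
    List (List (List (String × Int))) :=
  pvOuter predictions predictions.length 0

-- ===== PRECONDITION & SPEC =====
def Spec_split_prediction_episodes_py (predictions : List (List (String × Int))) (out : List (List (List (String × Int)))) : Prop := out = split_prediction_episodes_py_alt predictions
instance (predictions : List (List (String × Int))) (out : List (List (List (String × Int)))) : Decidable (Spec_split_prediction_episodes_py predictions out) := by unfold Spec_split_prediction_episodes_py; infer_instance

-- ===== CLAIM =====
def Claim_equal_split_prediction_episodes_py : Prop := ∀ (predictions : List (List (String × Int))), Dom_split_prediction_episodes_py predictions → Spec_split_prediction_episodes_py predictions (split_prediction_episodes_py predictions)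

-- ===== LEMMAS AND PROOFS =====

-- reference form both ports are reduced to: take the run of entries with no cut, then recurse
def pvSpanRun : List (String × Int) → List (List (String × Int)) →
    List (List (String × Int)) × List (List (String × Int))
  | _, [] => ([], [])
  | x, e :: rest =>
      if pvIsCut x e then ([], e :: rest)
      else
        let p := pvSpanRun e rest
        (e :: p.1, p.2)

theorem pvSpanRun_append (x : List (String × Int)) (l : List (List (String × Int))) :
    (pvSpanRun x l).1 ++ (pvSpanRun x l).2 = l := by
  induction l generalizing x with
  | nil => simp [pvSpanRun]
  | cons e rest ih =>
      simp only [pvSpanRun]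
      split
      · simp
      · simpa using ih e

theorem pvSpanRun_snd_le (x : List (String × Int)) (l : List (List (String × Int))) :
    (pvSpanRun x l).2.length ≤ l.length := by
  have h := pvSpanRun_append x l
  have := congrArg List.length h
  simp at this
  omega

def pvSpecSplit : List (List (String × Int)) → List (List (List (String × Int)))
  | [] => []
  | p :: ps =>
      (p :: (pvSpanRun p ps).1) :: pvSpecSplit (pvSpanRun p ps).2
termination_by l => l.length
decreasing_by
  have := pvSpanRun_snd_le p ps
  simp
  omega

-- A's loop, once an entry x has been consumed (cur ≠ [], registers hold x's key), computes the spec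
theorem pvLoopA_spec (rest : List (List (String × Int)))
    (eps : List (List (List (String × Int)))) (cur : List (List (String × Int)))
    (x : List (String × Int)) (hcur : cur ≠ []) :
    pvLoopA rest eps cur (pvTsA x) (some (pvEnvA x)) =
      eps ++ (cur ++ (pvSpanRun x rest).1) :: pvSpecSplit (pvSpanRun x rest).2 := by
  induction rest generalizing eps cur x with
  | nil => simp [pvLoopA, pvSpanRun, pvSpecSplit, hcur]
  | cons e rest' ih =>
      have hflag : (!cur.isEmpty && ((pvTsA e).isNone || (pvTsA x).isNone ||
            (match pvTsA e, pvTsA x with | some a, some b => decide (a < b) | _, _ => false) ||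
            (pvTsA e == some 0 && some (pvEnvA e) == some (pvEnvA x))))
          = pvIsCut x e := by
        simp [pvIsCut, pvTsA, pvEnvA, hcur]
      simp only [pvLoopA, hflag, pvSpanRun]
      by_cases hc : pvIsCut x e = true
      · rw [hc]
        simp only [if_true]
        rw [ih (eps ++ [cur]) [e] e (by simp)]
        rw [pvSpecSplit]
        simp
      · rw [Bool.not_eq_true] at hc
        rw [hc]
        simp only [Bool.false_eq_true, if_false]
        rw [ih eps (cur ++ [e]) e (by simp)]
        simp

-- the inner while returns i+1 plus the length of the no-cut run starting after index i
theorem pvFindJ_eq (preds : List (List (String × Int))) :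
    ∀ k i, preds.length - i ≤ k → i < preds.length →
      pvFindJ preds preds.length (i + 1) =
        i + 1 + (pvSpanRun (preds.getD i []) (preds.drop (i + 1))).1.length := by
  intro k
  induction k with
  | zero => intro i hk hi; omega
  | succ k ih =>
      intro i hk hi
      rw [pvFindJ]
      by_cases h1 : i + 1 < preds.length
      · have hdrop : preds.drop (i + 1) = preds.getD (i + 1) [] :: preds.drop (i + 2) := by
          rw [List.getD_eq_getElem _ _ h1, List.drop_eq_getElem_cons h1]
        rw [hdrop]
        simp only [h1, dif_pos, Nat.add_sub_cancel, pvSpanRun]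
        by_cases hc : pvIsCut (preds.getD i []) (preds.getD (i + 1) []) = true
        · simp only [List.getD] at hc ⊢
          simp [hc]
        · rw [Bool.not_eq_true] at hc
          simp only [List.getD] at hc ⊢
          simp only [hc, Bool.false_eq_true, if_false]
          rw [ih (i + 1) (by omega) h1]
          have hdrop2 : preds.drop (i + 1 + 1) = preds.drop (i + 2) := by norm_num
          rw [hdrop2]
          simp [List.getD]
          omega
      · have hlen : preds.length = i + 1 := by omega
        have : preds.drop (i + 1) = [] := by
          apply List.drop_eq_nil_of_le; omega
        simp [h1, this, pvSpanRun]

-- the outer while from index i computes the spec on the suffix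
theorem pvOuter_eq (preds : List (List (String × Int))) :
    ∀ k i, preds.length - i ≤ k →
      pvOuter preds preds.length i = pvSpecSplit (preds.drop i) := by
  intro k
  induction k with
  | zero =>
      intro i hk
      have hi : ¬ i < preds.length := by omega
      rw [pvOuter]
      simp [hi, List.drop_eq_nil_of_le (by omega : preds.length ≤ i), pvSpecSplit]
  | succ k ih =>
      intro i hk
      rw [pvOuter]
      by_cases hi : i < preds.length
      · simp only [hi, dif_pos]
        have hJ := pvFindJ_eq preds (preds.length - i) i (by omega) hi
        set r := (pvSpanRun (preds.getD i []) (preds.drop (i + 1))).1 with hr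
        set rem := (pvSpanRun (preds.getD i []) (preds.drop (i + 1))).2 with hrem
        have happ : r ++ rem = preds.drop (i + 1) := pvSpanRun_append _ _
        have hdropi : preds.drop i = preds.getD i [] :: preds.drop (i + 1) := by
          rw [List.getD_eq_getElem _ _ hi, List.drop_eq_getElem_cons hi]
        -- the slice: predictions[i:j] = preds[i] :: r
        have hslice : PySem.List.slice preds (some (i : Int))
            (some ((pvFindJ preds preds.length (i + 1) : Nat) : Int)) =
            preds.getD i [] :: r := by
          rw [hJ]
          rw [PySem.List.slice_natCast]
          rw [hdropi]
          have : i + 1 + r.length - i = r.length + 1 := by omega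
          rw [this]
          simp only [List.take_succ_cons]
          rw [← happ]
          simp
        -- the recursive call: drop j = rem
        have hdropj : preds.drop (pvFindJ preds preds.length (i + 1)) = rem := by
          rw [hJ, ← List.drop_drop, ← happ, List.drop_left]
        rw [ih (pvFindJ preds preds.length (i + 1)) (by have := pvFindJ_ge preds preds.length (i + 1); omega)]
        rw [hdropj, hslice, hdropi]
        rw [pvSpecSplit]
      · simp only [hi, dif_neg, not_false_iff]
        rw [List.drop_eq_nil_of_le (by omega : preds.length ≤ i)]
        rw [pvSpecSplit]

-- ===== VERDICT =====
theorem split_prediction_episodes_py_spec : Claim_equal_split_prediction_episodes_py := by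
  intro predictions _
  unfold Spec_split_prediction_episodes_py
  unfold split_prediction_episodes_py split_prediction_episodes_py_alt
  rw [pvOuter_eq predictions predictions.length 0 (by omega)]
  cases predictions with
  | nil => simp [pvSpecSplit]
  | cons p ps =>
      simp only [List.isEmpty_cons, Bool.false_eq_true, if_false, List.drop_zero]
      simp only [pvLoopA, List.isEmpty_nil, Bool.not_true, Bool.false_and, Bool.false_eq_true,
        if_false, List.nil_append]
      rw [pvLoopA_spec ps [] [p] p (by simp)]
      rw [pvSpecSplit]
      simp
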